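-- pv_equiv track=rewrite | github.com/sujiea/hackerrank-codility | journeyToMoon.py | journeyToMoon
-- ===== SOURCE A (Python) =====
-- class QUWPC:
--     def __init__(self, n):
--         self.connected = [i for i in range(n)]
--         self.sz = [1] * n
--
--     def root(self, i):
--         while self.connected[i] != i:
--             i = self.connected[i]
--         return i
--
--     def unite(self, p, q):
--         i = self.root(p)
--         j = self.root(q)
--         if self.sz[i] > self.sz[j]:
--             self.connected[j] = i
--             self.sz[i] += self.sz[j]
--         else:
--             self.connected[i] = j
--             self.sz[j] += self.sz[i]
--
-- def journeyToMoon(n, astronaut):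
--     quwpc = QUWPC(n)
--
--     for v in astronaut:
--         quwpc.unite(v[0], v[1])
--
--     result = 0
--     dict = {}
--     for i in range(n):
--         r = quwpc.root(i)
--         dict[r] = dict.get(r, 0) + 1
--     sum = 0
--     for k in dict.keys():
--         result += dict[k] * sum
--         sum += dict[k]
--
--     return result
-- ===== SOURCE B (Python) =====
-- def journeyToMoon(n, astronaut):
--     # quick-find: label[x] is the component id of astronaut x
--     label = list(range(n))
--     for v in astronaut:
--         la, lb = label[v[0]], label[v[1]]
--         if la != lb:
--             label = [lb if y == la else y for y in label]
--     # pairs in the same country, counted with multiplicity, then the closed form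
--     same = sum(label.count(x) for x in label)
--     return (n * n - same) // 2
-- ===== Notes on version B (the rewrite author's own statement) =====
-- stated objective: alternative
-- what changed: Replaces the weighted quick-union structure (parent/size arrays with root-chasing walks) and the dict-of-counts running-sum aggregation by a quick-find label array (each union relabels one whole class) and the closed form (n^2 - sum of same-component pair counts) // 2.
-- outside the precondition, e.g. on journeyToMoon(-2, []): A returns 0, B returns 2
import Mathlib
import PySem

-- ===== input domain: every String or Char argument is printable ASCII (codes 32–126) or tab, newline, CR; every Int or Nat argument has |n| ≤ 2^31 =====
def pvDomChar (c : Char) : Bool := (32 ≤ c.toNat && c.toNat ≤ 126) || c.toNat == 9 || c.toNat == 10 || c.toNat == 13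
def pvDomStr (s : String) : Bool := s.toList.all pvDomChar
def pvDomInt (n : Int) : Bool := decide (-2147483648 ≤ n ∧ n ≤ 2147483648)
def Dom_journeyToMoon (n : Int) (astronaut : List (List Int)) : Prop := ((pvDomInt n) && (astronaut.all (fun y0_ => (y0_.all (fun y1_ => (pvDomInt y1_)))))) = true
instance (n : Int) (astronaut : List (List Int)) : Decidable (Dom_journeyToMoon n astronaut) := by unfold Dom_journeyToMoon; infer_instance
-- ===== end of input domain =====

-- B replaces A's weighted quick-union (parent/size arrays, root walks, dict-of-counts running sum)
-- by a quick-find label array plus the closed form (n*n - same-component pair count) // 2; same return value on Pre_.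

-- ===== PORT A =====
-- QUWPC.root: while connected[i] != i: i = connected[i] (fuel = len(connected) suffices, see proofs)
def rootA (conn : List Int) : Nat → Int → Int
  | 0, i => i
  | fuel+1, i =>
    if PySem.List.pyGetD conn i 0 ≠ i then rootA conn fuel (PySem.List.pyGetD conn i 0) else i

-- QUWPC.unite body after i = root(p), j = root(q)
def uniteGo (conn sz : List Int) (i j : Int) : List Int × List Int :=
  if PySem.List.pyGetD sz i 0 > PySem.List.pyGetD sz j 0 then
    (PySem.List.pySetD conn j i,
     PySem.List.pySetD sz i (PySem.List.pyGetD sz i 0 + PySem.List.pyGetD sz j 0))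
  else
    (PySem.List.pySetD conn i j,
     PySem.List.pySetD sz j (PySem.List.pyGetD sz j 0 + PySem.List.pyGetD sz i 0))

def uniteA (conn sz : List Int) (p q : Int) : List Int × List Int :=
  uniteGo conn sz (rootA conn conn.length p) (rootA conn conn.length q)

def journeyToMoon (n : Int) (astronaut : List (List Int)) : Int :=
  let st := astronaut.foldl
    (fun st v => uniteA st.1 st.2 (PySem.List.pyGetD v 0 0) (PySem.List.pyGetD v 1 0))
    (PySem.List.pyRange 0 n 1, List.replicate n.toNat 1)
  let d := (PySem.List.pyRange 0 n 1).foldl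
    (fun d i => d.insert (rootA st.1 st.1.length i) (d.getD (rootA st.1 st.1.length i) 0 + 1))
    (PySem.Dict.empty : PySem.Dict Int Int)
  (d.keys.foldl (fun rs k => (rs.1 + d.getD k 0 * rs.2, rs.2 + d.getD k 0)) ((0:Int), (0:Int))).1

-- ===== PORT B =====
def journeyToMoon_alt (n : Int) (astronaut : List (List Int)) : Int :=
  let label := astronaut.foldl
    (fun lab v =>
      if PySem.List.pyGetD lab (PySem.List.pyGetD v 0 0) 0 ≠ PySem.List.pyGetD lab (PySem.List.pyGetD v 1 0) 0 then
        lab.map (fun y => if y = PySem.List.pyGetD lab (PySem.List.pyGetD v 0 0) 0 then PySem.List.pyGetD lab (PySem.List.pyGetD v 1 0) 0 else y)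
      else lab)
    (PySem.List.pyRange 0 n 1)
  PySem.Int.floordiv (n * n - (label.map (fun x => (PySem.List.count label x : Int))).sum) 2

-- ===== PRECONDITION & SPEC =====
-- Pre_ excludes negative n (a nonsense astronaut count, on which A's 0 is an accident of range(n) being
-- empty while B's closed form gives n*n//2) and malformed edges (length < 2, or an endpoint outside
-- [-n, n)) on which A raises IndexError.
def Pre_journeyToMoon (n : Int) (astronaut : List (List Int)) : Prop :=
  0 ≤ n ∧ ∀ v ∈ astronaut, 2 ≤ v.length ∧
    -n ≤ v.getD 0 0 ∧ v.getD 0 0 < n ∧ -n ≤ v.getD 1 0 ∧ v.getD 1 0 < n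
instance (n : Int) (astronaut : List (List Int)) : Decidable (Pre_journeyToMoon n astronaut) := by
  unfold Pre_journeyToMoon; infer_instance

def pvWitness_journeyToMoon : Int × List (List Int) := (3, [[0, 1]])

def Spec_journeyToMoon (n : Int) (astronaut : List (List Int)) (out : Int) : Prop := out = journeyToMoon_alt n astronaut
instance (n : Int) (astronaut : List (List Int)) (out : Int) : Decidable (Spec_journeyToMoon n astronaut out) := by unfold Spec_journeyToMoon; infer_instance

-- ===== CLAIM (what is proved, stated in full; the proofs are below) =====
def Claim_equal_journeyToMoon : Prop := ∀ (n : Int) (astronaut : List (List Int)), Dom_journeyToMoon n astronaut → Pre_journeyToMoon n astronaut → Spec_journeyToMoon n astronaut (journeyToMoon n astronaut)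

-- ===== LEMMAS AND PROOFS =====

/-- One parent-pointer step (also the component label read): `xs[x]`. -/
abbrev Fc (xs : List Int) (x : Int) : Int := PySem.List.pyGetD xs x 0

/-- `m` parent-pointer steps. -/
abbrev itC (conn : List Int) (m : Nat) (x : Int) : Int := (Fc conn)^[m] x

/-- Invariant of A's parent array: length `N`, entries of `[0,N)` in `[0,N)`,
and every walk reaches a fixpoint. -/
def InvC (N : Nat) (conn : List Int) : Prop :=
  conn.length = N ∧
  (∀ x : Int, 0 ≤ x → x < (N:Int) → 0 ≤ Fc conn x ∧ Fc conn x < (N:Int)) ∧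
  (∀ x : Int, 0 ≤ x → x < (N:Int) → ∃ m : Nat, Fc conn (itC conn m x) = itC conn m x)

/-- A's root function with the fuel A's port uses. -/
def RT (conn : List Int) (x : Int) : Int := rootA conn conn.length x

lemma RT_def (conn : List Int) (x : Int) : RT conn x = rootA conn conn.length x := rfl

/-- Coupling invariant: A's root partition coincides with B's label partition. -/
def CORR (N : Nat) (conn lab : List Int) : Prop :=
  ∀ x y : Int, 0 ≤ x → x < (N:Int) → 0 ≤ y → y < (N:Int) →
    (RT conn x = RT conn y ↔ Fc lab x = Fc lab y)

lemma itC_zero (conn : List Int) (x : Int) : itC conn 0 x = x := rfl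

lemma itC_succ' (conn : List Int) (m : Nat) (x : Int) :
    itC conn (m+1) x = Fc conn (itC conn m x) := Function.iterate_succ_apply' _ _ _

lemma itC_add (conn : List Int) (a b : Nat) (x : Int) :
    itC conn (a + b) x = itC conn a (itC conn b x) := Function.iterate_add_apply _ _ _ _

lemma iter_range {N : Nat} {conn : List Int} (hInv : InvC N conn) (m : Nat) (x : Int)
    (hx0 : 0 ≤ x) (hxN : x < (N:Int)) : 0 ≤ itC conn m x ∧ itC conn m x < (N:Int) := by
  induction m with
  | zero => exact ⟨hx0, hxN⟩
  | succ k ih => rw [itC_succ']; exact hInv.2.1 _ ih.1 ih.2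

lemma root_iter {conn : List Int} {r : Int} (h : Fc conn r = r) (m : Nat) : itC conn m r = r := by
  induction m with
  | zero => rfl
  | succ k ih => rw [itC_succ', ih, h]

lemma reach_unique {conn : List Int} {x : Int} {m₁ m₂ : Nat}
    (h1 : Fc conn (itC conn m₁ x) = itC conn m₁ x)
    (h2 : Fc conn (itC conn m₂ x) = itC conn m₂ x) : itC conn m₁ x = itC conn m₂ x := by
  rcases Nat.le_total m₁ m₂ with h | h
  · have e : itC conn m₂ x = itC conn (m₂ - m₁) (itC conn m₁ x) := by
      rw [← itC_add]; congr 1; omega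
    rw [e, root_iter h1]
  · have e : itC conn m₁ x = itC conn (m₁ - m₂) (itC conn m₂ x) := by
      rw [← itC_add]; congr 1; omega
    rw [e, root_iter h2]

lemma rootA_of_root {conn : List Int} {x : Int} (h : Fc conn x = x) (fuel : Nat) :
    rootA conn fuel x = x := by
  cases fuel with
  | zero => rfl
  | succ f => simp only [rootA]; rw [if_neg (by simp [h])]

lemma rootA_step {conn : List Int} {x : Int} (h : Fc conn x ≠ x) (f : Nat) :
    rootA conn (f+1) x = rootA conn f (Fc conn x) := by
  simp only [rootA]; rw [if_pos h]

lemma rootA_reaches {conn : List Int} : ∀ (m : Nat) (x : Int) (fuel : Nat),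
    (∀ k, k < m → Fc conn (itC conn k x) ≠ itC conn k x) →
    Fc conn (itC conn m x) = itC conn m x → m ≤ fuel → rootA conn fuel x = itC conn m x := by
  intro m
  induction m with
  | zero => intro x fuel _ hroot _; exact rootA_of_root hroot fuel
  | succ k ih =>
    intro x fuel hmin hroot hle
    obtain ⟨f, rfl⟩ : ∃ f, fuel = f + 1 := ⟨fuel - 1, by omega⟩
    have hx : Fc conn x ≠ x := by
      have := hmin 0 (by omega); simpa [itC_zero] using this
    rw [rootA_step hx]
    have hshift : ∀ j, itC conn j (Fc conn x) = itC conn (j+1) x := by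
      intro j
      have h1 : itC conn 1 x = Fc conn x := by rw [itC_succ', itC_zero]
      rw [show j + 1 = j + 1 from rfl, itC_add conn j 1 x, h1]
    rw [show itC conn (k+1) x = itC conn k (Fc conn x) from (hshift k).symm]
    refine ih (Fc conn x) f ?_ ?_ (by omega)
    · intro j hj
      rw [hshift j]; exact hmin (j+1) (by omega)
    · rw [hshift k]
      exact hroot

lemma exists_min_root {N : Nat} {conn : List Int} (hInv : InvC N conn) {x : Int}
    (hx0 : 0 ≤ x) (hxN : x < (N:Int)) :
    ∃ m : Nat, m < N ∧ Fc conn (itC conn m x) = itC conn m x ∧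
      ∀ k, k < m → Fc conn (itC conn k x) ≠ itC conn k x := by
  have hex : ∃ m : Nat, Fc conn (itC conn m x) = itC conn m x := hInv.2.2 x hx0 hxN
  have hroot := Nat.find_spec hex
  have hmin : ∀ k, k < Nat.find hex → ¬ (Fc conn (itC conn k x) = itC conn k x) :=
    fun k hk => Nat.find_min hex hk
  refine ⟨Nat.find hex, ?_, hroot, hmin⟩
  set m₀ := Nat.find hex with hm₀
  have hnorep : ∀ k₁ k₂, k₁ < k₂ → k₂ ≤ m₀ → itC conn k₁ x ≠ itC conn k₂ x := by
    intro k₁ k₂ hlt hle heq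
    have e : itC conn (m₀ - k₂ + k₁) x = itC conn m₀ x := by
      rw [itC_add, heq, ← itC_add]; congr 1; omega
    have hr2 : Fc conn (itC conn (m₀ - k₂ + k₁) x) = itC conn (m₀ - k₂ + k₁) x := by
      rw [e]; exact hroot
    exact hmin (m₀ - k₂ + k₁) (by omega) hr2
  rcases Nat.lt_or_ge m₀ N with hlt | hge
  · exact hlt
  exfalso
  have hinj : Set.InjOn (fun k => (itC conn k x).toNat) ↑(Finset.range (m₀+1)) := by
    intro a ha b hb hab
    simp only [Finset.coe_range, Set.mem_Iio] at ha hb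
    by_contra hne
    have hra := iter_range hInv a x hx0 hxN
    have hrb := iter_range hInv b x hx0 hxN
    have heq : itC conn a x = itC conn b x := by
      simp only at hab; omega
    rcases Nat.lt_or_ge a b with h | h
    · exact hnorep a b h (by omega) heq
    · have hba : b < a := by omega
      exact hnorep b a hba (by omega) heq.symm
  have hsub : (Finset.range (m₀+1)).image (fun k => (itC conn k x).toNat) ⊆ Finset.range N := by
    intro t ht
    simp only [Finset.mem_image, Finset.mem_range] at ht ⊢
    obtain ⟨k, hk, rfl⟩ := ht
    have := iter_range hInv k x hx0 hxN
    omega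
  have hcard := Finset.card_le_card hsub
  rw [Finset.card_image_of_injOn hinj, Finset.card_range, Finset.card_range] at hcard
  omega

lemma RT_spec {N : Nat} {conn : List Int} (hInv : InvC N conn) {x : Int}
    (hx0 : 0 ≤ x) (hxN : x < (N:Int)) :
    Fc conn (RT conn x) = RT conn x ∧ ∃ m : Nat, itC conn m x = RT conn x := by
  obtain ⟨m, hmN, hroot, hmin⟩ := exists_min_root hInv hx0 hxN
  have e : rootA conn conn.length x = itC conn m x :=
    rootA_reaches m x conn.length hmin hroot (by rw [hInv.1]; omega)
  rw [RT_def, e]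
  exact ⟨hroot, m, rfl⟩

lemma RT_eq_of_reach {N : Nat} {conn : List Int} (hInv : InvC N conn) {x : Int}
    (hx0 : 0 ≤ x) (hxN : x < (N:Int)) {m : Nat}
    (h : Fc conn (itC conn m x) = itC conn m x) : RT conn x = itC conn m x := by
  obtain ⟨hr, m', hm'⟩ := RT_spec hInv hx0 hxN
  rw [← hm']
  exact reach_unique (by rw [hm']; exact hr) h

lemma RT_range {N : Nat} {conn : List Int} (hInv : InvC N conn) {x : Int}
    (hx0 : 0 ≤ x) (hxN : x < (N:Int)) : 0 ≤ RT conn x ∧ RT conn x < (N:Int) := by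
  obtain ⟨_, m, hm⟩ := RT_spec hInv hx0 hxN
  rw [← hm]
  exact iter_range hInv m x hx0 hxN

lemma RT_of_root {conn : List Int} {x : Int} (h : Fc conn x = x) : RT conn x = x :=
  rootA_of_root h _

/-- Python's negative-index wraparound for `xs[x]`, `-len ≤ x < 0`. -/
lemma pyGetD_wrap {α : Type} (xs : List α) (d : α) (x : Int)
    (h1 : -(xs.length : Int) ≤ x) (h2 : x < 0) :
    PySem.List.pyGetD xs x d = PySem.List.pyGetD xs (x + xs.length) d := by
  have hk : x = -(((-x).toNat : Nat) : Int) := by omega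
  rw [hk, PySem.List.pyGetD_neg_natCast xs (-x).toNat d (by omega) (by omega)]
  rw [PySem.List.pyGetD_eq_getElem xs d (i := -(((-x).toNat : Nat) : Int) + xs.length)
    (by omega) (by omega)]
  congr 1
  omega

lemma RT_wrap {N : Nat} {conn : List Int} (hInv : InvC N conn) {x : Int}
    (h1 : -(N:Int) ≤ x) (h2 : x < 0) : RT conn x = RT conn (x + (N:Int)) := by
  have hN : 0 < N := by omega
  have hlen : conn.length = N := hInv.1
  have hFx : Fc conn x = Fc conn (x + (N:Int)) := by
    have h := pyGetD_wrap conn 0 x (by rw [hlen]; exact h1) h2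
    rw [hlen] at h
    exact h
  have hxr1 : (0:Int) ≤ x + (N:Int) := by omega
  have hxr2 : x + (N:Int) < (N:Int) := by omega
  have hrange := hInv.2.1 (x + (N:Int)) hxr1 hxr2
  obtain ⟨f, hf⟩ : ∃ f, N = f + 1 := ⟨N - 1, by omega⟩
  have hfuel : conn.length = f + 1 := by rw [hlen, hf]
  rw [RT_def, RT_def, hfuel]
  have hxne : Fc conn x ≠ x := by
    intro hcontra
    rw [hFx] at hcontra
    omega
  rw [rootA_step hxne]
  by_cases hroot : Fc conn (x + (N:Int)) = x + (N:Int)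
  · rw [rootA_of_root hroot (f+1), hFx, hroot, rootA_of_root hroot f]
  · rw [rootA_step hroot, hFx]

lemma Fc_set {conn : List Int} {I J y : Int} (hJ0 : 0 ≤ J) (hJN : J < (conn.length : Int))
    (hy0 : 0 ≤ y) (hyN : y < (conn.length : Int)) :
    Fc (PySem.List.pySetD conn J I) y = if y = J then I else Fc conn y := by
  have ey : y = ((y.toNat : Nat) : Int) := by omega
  rw [show PySem.List.pySetD conn J I = PySem.List.pySetD conn ((J.toNat : Nat) : Int) I from by
    congr 1; omega]
  show PySem.List.pyGetD _ y 0 = _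
  conv_lhs => rw [ey]
  rw [PySem.List.pyGetD_pySetD_natCast conn J.toNat y.toNat I 0 (by omega)]
  by_cases h : y = J
  · rw [if_pos (by omega : y.toNat = J.toNat), if_pos h]
  · rw [if_neg (by omega : ¬ y.toNat = J.toNat), if_neg h]
    show PySem.List.pyGetD conn _ 0 = PySem.List.pyGetD conn y 0
    congr 1
    omega

lemma update_RT {N : Nat} {conn : List Int} (hInv : InvC N conn) {I J : Int}
    (hI0 : 0 ≤ I) (hIN : I < (N:Int)) (hJ0 : 0 ≤ J) (hJN : J < (N:Int))
    (hrI : Fc conn I = I) (hrJ : Fc conn J = J) (hne : I ≠ J) :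
    InvC N (PySem.List.pySetD conn J I) ∧
    ∀ x : Int, 0 ≤ x → x < (N:Int) →
      RT (PySem.List.pySetD conn J I) x = if RT conn x = J then I else RT conn x := by
  have hlen : conn.length = N := hInv.1
  have hlen' : (PySem.List.pySetD conn J I).length = N := by
    rw [PySem.List.length_pySetD, hlen]
  have hF' : ∀ y : Int, 0 ≤ y → y < (N:Int) →
      Fc (PySem.List.pySetD conn J I) y = if y = J then I else Fc conn y := by
    intro y hy0 hyN
    exact Fc_set hJ0 (by rw [hlen]; exact hJN) hy0 (by rw [hlen]; exact hyN)
  have hrI' : Fc (PySem.List.pySetD conn J I) I = I := by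
    rw [hF' I hI0 hIN, if_neg hne, hrI]
  have key : ∀ x : Int, 0 ≤ x → x < (N:Int) →
      Fc (PySem.List.pySetD conn J I) (if RT conn x = J then I else RT conn x)
        = (if RT conn x = J then I else RT conn x) ∧
      ∃ m : Nat, itC (PySem.List.pySetD conn J I) m x = (if RT conn x = J then I else RT conn x) := by
    intro x hx0 hxN
    obtain ⟨m₀, hm₀N, hroot, hmin⟩ := exists_min_root hInv hx0 hxN
    have hRTx : RT conn x = itC conn m₀ x := RT_eq_of_reach hInv hx0 hxN hroot
    by_cases hxJ : RT conn x = J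
    · have hkJ : ∀ k, k < m₀ → itC conn k x ≠ J := by
        intro k hk heq
        exact hmin k hk (by rw [heq]; exact hrJ)
      have hstep : ∀ k, k ≤ m₀ → itC (PySem.List.pySetD conn J I) k x = itC conn k x := by
        intro k
        induction k with
        | zero => intro _; rfl
        | succ j ih =>
          intro hj
          rw [itC_succ', itC_succ', ih (by omega)]
          have hr := iter_range hInv j x hx0 hxN
          rw [hF' _ hr.1 hr.2, if_neg (hkJ j (by omega))]
      constructor
      · rw [if_pos hxJ]; exact hrI'
      · refine ⟨m₀ + 1, ?_⟩
        rw [if_pos hxJ, itC_succ', hstep m₀ le_rfl, ← hRTx, hxJ, hF' J hJ0 hJN, if_pos rfl]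
    · have hkJ : ∀ k, itC conn k x ≠ J := by
        intro k heq
        have hrootk : Fc conn (itC conn k x) = itC conn k x := by rw [heq]; exact hrJ
        have hrt : RT conn x = itC conn k x := RT_eq_of_reach hInv hx0 hxN hrootk
        exact hxJ (by rw [hrt, heq])
      have hstep : ∀ k, itC (PySem.List.pySetD conn J I) k x = itC conn k x := by
        intro k
        induction k with
        | zero => rfl
        | succ j ih =>
          rw [itC_succ', itC_succ', ih]
          have hr := iter_range hInv j x hx0 hxN
          rw [hF' _ hr.1 hr.2, if_neg (hkJ j)]
      constructor
      · rw [if_neg hxJ, hRTx]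
        have hrr := iter_range hInv m₀ x hx0 hxN
        rw [hF' _ hrr.1 hrr.2, if_neg (hkJ m₀)]
        exact hroot
      · exact ⟨m₀, by rw [if_neg hxJ, hstep m₀, hRTx]⟩
  have hInv' : InvC N (PySem.List.pySetD conn J I) := by
    refine ⟨hlen', ?_, ?_⟩
    · intro y hy0 hyN
      rw [hF' y hy0 hyN]
      split_ifs
      · exact ⟨hI0, hIN⟩
      · exact hInv.2.1 y hy0 hyN
    · intro x hx0 hxN
      obtain ⟨hroot', m, hm⟩ := key x hx0 hxN
      exact ⟨m, by rw [hm]; exact hroot'⟩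
  refine ⟨hInv', ?_⟩
  intro x hx0 hxN
  obtain ⟨hroot', m, hm⟩ := key x hx0 hxN
  have h := RT_eq_of_reach hInv' hx0 hxN (m := m) (by rw [hm]; exact hroot')
  rw [h, hm]

lemma merge_iff (I J u v : Int) (_hne : I ≠ J) :
    ((if u = J then I else u) = (if v = J then I else v)) ↔
      (u = v ∨ ((u = I ∨ u = J) ∧ (v = I ∨ v = J))) := by
  split_ifs <;> omega

lemma Fc_map {lab : List Int} (g : Int → Int) {x : Int} (hx0 : 0 ≤ x)
    (hxN : x < (lab.length : Int)) : Fc (lab.map g) x = g (Fc lab x) := by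
  show PySem.List.pyGetD (lab.map g) x 0 = g (PySem.List.pyGetD lab x 0)
  rw [PySem.List.pyGetD_eq_getElem _ _ hx0 (by simpa using hxN),
      PySem.List.pyGetD_eq_getElem _ _ hx0 hxN, List.getElem_map]

lemma list_set_self {xs : List Int} {k : Nat} {v : Int} (hk : k < xs.length)
    (hv : xs[k] = v) : xs.set k v = xs := by
  apply List.ext_getElem (by simp)
  intro i h1 h2
  rw [List.getElem_set]
  split_ifs with h
  · subst h; exact hv.symm
  · rfl

lemma step_couple {N : Nat} {conn sz lab : List Int}
    (hInv : InvC N conn) (hlen : lab.length = N) (hcorr : CORR N conn lab)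
    {p q : Int} (hp1 : -(N:Int) ≤ p) (hp2 : p < (N:Int)) (hq1 : -(N:Int) ≤ q) (hq2 : q < (N:Int)) :
    InvC N (uniteA conn sz p q).1 ∧
    (if PySem.List.pyGetD lab p 0 ≠ PySem.List.pyGetD lab q 0 then
        lab.map (fun y => if y = PySem.List.pyGetD lab p 0 then PySem.List.pyGetD lab q 0 else y)
      else lab).length = N ∧
    CORR N (uniteA conn sz p q).1
      (if PySem.List.pyGetD lab p 0 ≠ PySem.List.pyGetD lab q 0 then
        lab.map (fun y => if y = PySem.List.pyGetD lab p 0 then PySem.List.pyGetD lab q 0 else y)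
      else lab) := by
  obtain ⟨P, hP0, hPN, hPrt, hPgl⟩ :
      ∃ P : Int, 0 ≤ P ∧ P < (N:Int) ∧ RT conn p = RT conn P ∧ Fc lab p = Fc lab P := by
    by_cases h : 0 ≤ p
    · exact ⟨p, h, hp2, rfl, rfl⟩
    · have h : p < 0 := by omega
      refine ⟨p + (N:Int), by omega, by omega, RT_wrap hInv hp1 h, ?_⟩
      have hw := pyGetD_wrap lab 0 p (by rw [hlen]; exact hp1) h
      rw [hlen] at hw
      exact hw
  obtain ⟨Q, hQ0, hQN, hQrt, hQgl⟩ :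
      ∃ Q : Int, 0 ≤ Q ∧ Q < (N:Int) ∧ RT conn q = RT conn Q ∧ Fc lab q = Fc lab Q := by
    by_cases h : 0 ≤ q
    · exact ⟨q, h, hq2, rfl, rfl⟩
    · have h : q < 0 := by omega
      refine ⟨q + (N:Int), by omega, by omega, RT_wrap hInv hq1 h, ?_⟩
      have hw := pyGetD_wrap lab 0 q (by rw [hlen]; exact hq1) h
      rw [hlen] at hw
      exact hw
  have hA1 : rootA conn conn.length p = RT conn P := (RT_def conn p).symm.trans hPrt
  have hA2 : rootA conn conn.length q = RT conn Q := (RT_def conn q).symm.trans hQrt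
  have hIroot : Fc conn (RT conn P) = RT conn P := (RT_spec hInv hP0 hPN).1
  have hJroot : Fc conn (RT conn Q) = RT conn Q := (RT_spec hInv hQ0 hQN).1
  have hIrange := RT_range hInv hP0 hPN
  have hJrange := RT_range hInv hQ0 hQN
  have hcorrPQ : (RT conn P = RT conn Q) ↔ (Fc lab P = Fc lab Q) :=
    hcorr P Q hP0 hPN hQ0 hQN
  have hgoalB : (if PySem.List.pyGetD lab p 0 ≠ PySem.List.pyGetD lab q 0 then
        lab.map (fun y => if y = PySem.List.pyGetD lab p 0 then PySem.List.pyGetD lab q 0 else y)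
      else lab)
      = (if Fc lab P ≠ Fc lab Q then
        lab.map (fun y => if y = Fc lab P then Fc lab Q else y) else lab) := by
    show (if Fc lab p ≠ Fc lab q then lab.map (fun y => if y = Fc lab p then Fc lab q else y) else lab) = _
    rw [hPgl, hQgl]
  rw [hgoalB]
  have hunite : (uniteA conn sz p q).1 =
      if PySem.List.pyGetD sz (RT conn P) 0 > PySem.List.pyGetD sz (RT conn Q) 0 then
        PySem.List.pySetD conn (RT conn Q) (RT conn P)
      else PySem.List.pySetD conn (RT conn P) (RT conn Q) := by
    rw [uniteA, hA1, hA2, uniteGo]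
    split_ifs <;> rfl
  by_cases hIJ : RT conn P = RT conn Q
  · have hlalb : Fc lab P = Fc lab Q := hcorrPQ.mp hIJ
    have hBsame : (if Fc lab P ≠ Fc lab Q then
        lab.map (fun y => if y = Fc lab P then Fc lab Q else y) else lab) = lab := by
      rw [if_neg (by simpa using hlalb)]
    have hAsame : (uniteA conn sz p q).1 = conn := by
      rw [hunite, hIJ, if_neg (lt_irrefl _)]
      rw [PySem.List.pySetD_of_nonneg conn (RT conn Q) hJrange.1]
      apply list_set_self
      have h := hJroot
      rw [show Fc conn (RT conn Q) = PySem.List.pyGetD conn (RT conn Q) 0 from rfl] at h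
      rw [PySem.List.pyGetD_eq_getElem conn 0 hJrange.1 (by rw [hInv.1]; exact hJrange.2)] at h
      exact h
    rw [hAsame, hBsame]
    exact ⟨hInv, hlen, hcorr⟩
  · have hlalb : Fc lab P ≠ Fc lab Q := fun h => hIJ (hcorrPQ.mpr h)
    have hBmap : (if Fc lab P ≠ Fc lab Q then
        lab.map (fun y => if y = Fc lab P then Fc lab Q else y) else lab)
        = lab.map (fun y => if y = Fc lab P then Fc lab Q else y) := by
      rw [if_pos hlalb]
    rw [hBmap]
    have hlenB : (lab.map (fun y => if y = Fc lab P then Fc lab Q else y)).length = N := by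
      rw [List.length_map, hlen]
    have hGl' : ∀ x : Int, 0 ≤ x → x < (N:Int) →
        Fc (lab.map (fun y => if y = Fc lab P then Fc lab Q else y)) x
          = if Fc lab x = Fc lab P then Fc lab Q else Fc lab x := by
      intro x hx0 hxN
      rw [Fc_map _ hx0 (by rw [hlen]; exact hxN)]
    rw [hunite]
    split_ifs with hsz
    · obtain ⟨hInv', hRT'⟩ := update_RT hInv hIrange.1 hIrange.2 hJrange.1 hJrange.2
        hIroot hJroot hIJ
      refine ⟨hInv', hlenB, ?_⟩
      intro x y hx0 hxN hy0 hyN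
      rw [hRT' x hx0 hxN, hRT' y hy0 hyN, hGl' x hx0 hxN, hGl' y hy0 hyN]
      rw [merge_iff _ _ _ _ hIJ, merge_iff _ _ _ _ (Ne.symm hlalb)]
      rw [hcorr x y hx0 hxN hy0 hyN,
          hcorr x P hx0 hxN hP0 hPN, hcorr x Q hx0 hxN hQ0 hQN,
          hcorr y P hy0 hyN hP0 hPN, hcorr y Q hy0 hyN hQ0 hQN]
      tauto
    · obtain ⟨hInv', hRT'⟩ := update_RT hInv hJrange.1 hJrange.2 hIrange.1 hIrange.2
        hJroot hIroot (Ne.symm hIJ)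
      refine ⟨hInv', hlenB, ?_⟩
      intro x y hx0 hxN hy0 hyN
      rw [hRT' x hx0 hxN, hRT' y hy0 hyN, hGl' x hx0 hxN, hGl' y hy0 hyN]
      rw [merge_iff _ _ _ _ (Ne.symm hIJ), merge_iff _ _ _ _ (Ne.symm hlalb)]
      rw [hcorr x y hx0 hxN hy0 hyN,
          hcorr x P hx0 hxN hP0 hPN, hcorr x Q hx0 hxN hQ0 hQN,
          hcorr y P hy0 hyN hP0 hPN, hcorr y Q hy0 hyN hQ0 hQN]
      try tauto

lemma pyGetD_one_eq (v : List Int) : PySem.List.pyGetD v 1 0 = v.getD 1 0 := by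
  rw [show (1:Int) = ((1:Nat) : Int) by norm_num, PySem.List.pyGetD_natCast]

lemma fold_couple {N : Nat} : ∀ (ast : List (List Int)) (conn sz lab : List Int),
    InvC N conn → lab.length = N → CORR N conn lab →
    (∀ v ∈ ast, 2 ≤ v.length ∧ -(N:Int) ≤ v.getD 0 0 ∧ v.getD 0 0 < (N:Int) ∧
      -(N:Int) ≤ v.getD 1 0 ∧ v.getD 1 0 < (N:Int)) →
    InvC N ((ast.foldl
        (fun st v => uniteA st.1 st.2 (PySem.List.pyGetD v 0 0) (PySem.List.pyGetD v 1 0))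
        (conn, sz)).1) ∧
    (ast.foldl
        (fun lab v =>
          if PySem.List.pyGetD lab (PySem.List.pyGetD v 0 0) 0 ≠ PySem.List.pyGetD lab (PySem.List.pyGetD v 1 0) 0 then
            lab.map (fun y => if y = PySem.List.pyGetD lab (PySem.List.pyGetD v 0 0) 0 then PySem.List.pyGetD lab (PySem.List.pyGetD v 1 0) 0 else y)
          else lab)
        lab).length = N ∧
    CORR N ((ast.foldl
        (fun st v => uniteA st.1 st.2 (PySem.List.pyGetD v 0 0) (PySem.List.pyGetD v 1 0))
        (conn, sz)).1)
      (ast.foldl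
        (fun lab v =>
          if PySem.List.pyGetD lab (PySem.List.pyGetD v 0 0) 0 ≠ PySem.List.pyGetD lab (PySem.List.pyGetD v 1 0) 0 then
            lab.map (fun y => if y = PySem.List.pyGetD lab (PySem.List.pyGetD v 0 0) 0 then PySem.List.pyGetD lab (PySem.List.pyGetD v 1 0) 0 else y)
          else lab)
        lab) := by
  intro ast
  induction ast with
  | nil =>
    intro conn sz lab hInv hlen hcorr _
    exact ⟨hInv, hlen, hcorr⟩
  | cons v t ih =>
    intro conn sz lab hInv hlen hcorr hyp
    obtain ⟨hv2, he1, he2, he3, he4⟩ := hyp v (by simp)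
    have hp1 : -(N:Int) ≤ PySem.List.pyGetD v 0 0 := by rw [PySem.List.pyGetD_zero]; exact he1
    have hp2 : PySem.List.pyGetD v 0 0 < (N:Int) := by rw [PySem.List.pyGetD_zero]; exact he2
    have hq1 : -(N:Int) ≤ PySem.List.pyGetD v 1 0 := by rw [pyGetD_one_eq]; exact he3
    have hq2 : PySem.List.pyGetD v 1 0 < (N:Int) := by rw [pyGetD_one_eq]; exact he4
    obtain ⟨hInv', hlen', hcorr'⟩ := step_couple hInv hlen hcorr hp1 hp2 hq1 hq2 (sz := sz)
    simp only [List.foldl_cons]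
    exact ih _ _ _ hInv' hlen' hcorr' (fun w hw => hyp w (by simp [hw]))

lemma init_state {n : Int} (_hn : 0 ≤ n) :
    InvC n.toNat (PySem.List.pyRange 0 n 1) ∧
    (PySem.List.pyRange 0 n 1).length = n.toNat ∧
    CORR n.toNat (PySem.List.pyRange 0 n 1) (PySem.List.pyRange 0 n 1) := by
  have hlen : (PySem.List.pyRange 0 n 1).length = n.toNat := by
    rw [PySem.List.length_pyRange_one]; norm_num
  have hid : ∀ x : Int, 0 ≤ x → x < ((n.toNat : Nat) : Int) →
      Fc (PySem.List.pyRange 0 n 1) x = x := by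
    intro x hx0 hxN
    show PySem.List.pyGetD _ x 0 = x
    rw [PySem.List.pyGetD_eq_getElem _ _ hx0 (by rw [hlen]; omega)]
    rw [PySem.List.getElem_pyRange_one]
    omega
  refine ⟨⟨hlen, ?_, ?_⟩, hlen, ?_⟩
  · intro x hx0 hxN
    rw [hid x hx0 hxN]; exact ⟨hx0, hxN⟩
  · intro x hx0 hxN
    exact ⟨0, by simpa [itC_zero] using hid x hx0 hxN⟩
  · intro x y hx0 hxN hy0 hyN
    rw [RT_of_root (hid x hx0 hxN), RT_of_root (hid y hy0 hyN),
        hid x hx0 hxN, hid y hy0 hyN]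

/-- The final pair count both programs aggregate. -/
def aggE : List Int → Int
  | [] => 0
  | c :: t => c * t.sum + aggE t

lemma agg_fold (cs : List Int) : ∀ r s : Int,
    cs.foldl (fun rs c => (rs.1 + c * rs.2, rs.2 + c)) (r, s)
      = (r + s * cs.sum + aggE cs, s + cs.sum) := by
  induction cs with
  | nil => intro r s; simp [aggE]
  | cons c t ih =>
    intro r s
    simp only [List.foldl_cons, ih, aggE, List.sum_cons]
    rw [Prod.mk.injEq]
    exact ⟨by ring, by ring⟩

lemma aggE_eq (cs : List Int) :
    2 * aggE cs = cs.sum * cs.sum - (cs.map (fun c => c * c)).sum := by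
  induction cs with
  | nil => simp [aggE]
  | cons c t ih =>
    simp only [aggE, List.sum_cons, List.map_cons]
    linear_combination ih

lemma dedup_sum (f : Int → Int) (ys : List Int) :
    ((PySem.Set.ofList ys).map f).sum = ∑ m ∈ ys.toFinset, f m := by
  have hnd : (PySem.Set.ofList ys).Nodup := PySem.Set.nodup_ofList ys
  have htf : (PySem.Set.ofList ys).toFinset = ys.toFinset := by
    ext a; simp [List.mem_toFinset, PySem.Set.mem_ofList]
  rw [← List.sum_toFinset f hnd, htf]

lemma sum_counts (ys : List Int) :
    ((PySem.Set.ofList ys).map (fun k => (List.count k ys : Int))).sum = (ys.length : Int) := by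
  rw [dedup_sum]
  have h := Finset.sum_list_map_count ys (fun _ => (1:Int))
  rw [PySem.List.sum_map_const_int] at h
  simpa [nsmul_eq_mul] using h.symm

lemma sum_sq_counts (ys : List Int) :
    ((PySem.Set.ofList ys).map (fun k => (List.count k ys : Int) * (List.count k ys : Int))).sum
      = (ys.map (fun x => (List.count x ys : Int))).sum := by
  rw [dedup_sum]
  have h := Finset.sum_list_map_count ys (fun x => (List.count x ys : Int))
  simpa [nsmul_eq_mul] using h.symm


lemma final_glue {N : Nat} (cf labf : List Int) (n : Int) (hNn : ((N:Nat):Int) = n)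
    (hlenf : labf.length = N) (hcorr : CORR N cf labf) :
    (((PySem.List.pyRange 0 n 1).foldl
        (fun d i => d.insert (rootA cf cf.length i) (d.getD (rootA cf cf.length i) 0 + 1))
        (PySem.Dict.empty : PySem.Dict Int Int)).keys.foldl
      (fun rs k => (rs.1 + ((PySem.List.pyRange 0 n 1).foldl
          (fun d i => d.insert (rootA cf cf.length i) (d.getD (rootA cf cf.length i) 0 + 1))
          (PySem.Dict.empty : PySem.Dict Int Int)).getD k 0 * rs.2,
        rs.2 + ((PySem.List.pyRange 0 n 1).foldl
          (fun d i => d.insert (rootA cf cf.length i) (d.getD (rootA cf cf.length i) 0 + 1))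
          (PySem.Dict.empty : PySem.Dict Int Int)).getD k 0))
      ((0:Int),(0:Int))).1
    = PySem.Int.floordiv (n * n - (labf.map (fun x => (PySem.List.count labf x : Int))).sum) 2 := by
  have hd : (PySem.List.pyRange 0 n 1).foldl
      (fun d i => d.insert (rootA cf cf.length i) (d.getD (rootA cf cf.length i) 0 + 1))
      (PySem.Dict.empty : PySem.Dict Int Int)
      = PySem.Dict.counter ((PySem.List.pyRange 0 n 1).map (fun i => rootA cf cf.length i)) := by
    rw [← PySem.Dict.foldl_insert_getD_add_one_eq_counter]
    exact (List.foldl_map (f := fun i => rootA cf cf.length i)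
      (g := fun (d : PySem.Dict Int Int) x => d.insert x (d.getD x 0 + 1))).symm
  rw [hd]
  set ys := (PySem.List.pyRange 0 n 1).map (fun i => rootA cf cf.length i) with hys
  have hfold2 : ((PySem.Dict.counter ys).keys.foldl
      (fun (rs : Int × Int) k => (rs.1 + (PySem.Dict.counter ys).getD k 0 * rs.2,
        rs.2 + (PySem.Dict.counter ys).getD k 0)) ((0:Int),(0:Int)))
      = (((PySem.Dict.counter ys).keys.map (fun k => (PySem.Dict.counter ys).getD k 0)).foldl
        (fun rs c => (rs.1 + c * rs.2, rs.2 + c)) ((0:Int),(0:Int))) :=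
    (List.foldl_map (f := fun k => (PySem.Dict.counter ys).getD k 0)
      (g := fun (rs : Int × Int) c => (rs.1 + c * rs.2, rs.2 + c))).symm
  rw [hfold2]
  set cs := (PySem.Dict.counter ys).keys.map (fun k => (PySem.Dict.counter ys).getD k 0) with hcs
  rw [agg_fold]
  show (0:Int) + 0 * cs.sum + aggE cs = _
  rw [zero_mul, zero_add, zero_add]
  have hcs' : cs = (PySem.Set.ofList ys).map (fun k => (List.count k ys : Int)) := by
    rw [hcs, PySem.Dict.keys_counter]
    exact List.map_congr_left (fun k _ => PySem.Dict.getD_counter ys k)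
  have hS : cs.sum = (ys.length : Int) := by rw [hcs']; exact sum_counts ys
  have hQ : (cs.map (fun c => c * c)).sum = (ys.map (fun x => (List.count x ys : Int))).sum := by
    rw [hcs', List.map_map]
    exact sum_sq_counts ys
  have hlys : (ys.length : Int) = n := by
    rw [hys, List.length_map, PySem.List.length_pyRange_one]
    omega
  have hlab : labf = (PySem.List.pyRange 0 n 1).map (fun i => Fc labf i) := by
    apply List.ext_getElem
    · rw [List.length_map, PySem.List.length_pyRange_one, hlenf]
      omega
    · intro i h1 h2
      rw [List.getElem_map, PySem.List.getElem_pyRange_one]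
      have hi : (0:Int) + (i:Int) = ((i : Nat) : Int) := by omega
      show labf[i] = PySem.List.pyGetD labf ((0:Int) + (i:Int)) 0
      rw [hi, PySem.List.pyGetD_natCast, List.getD_eq_getElem labf 0 h1]
  have hRTys : ys = (PySem.List.pyRange 0 n 1).map (RT cf) := by
    rw [hys]
    exact List.map_congr_left (fun i _ => rfl)
  have hcnt : ∀ i ∈ PySem.List.pyRange 0 n 1,
      (List.count (RT cf i) ((PySem.List.pyRange 0 n 1).map (RT cf)) : Int)
        = (List.count (Fc labf i) ((PySem.List.pyRange 0 n 1).map (fun j => Fc labf j)) : Int) := by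
    intro i hi
    have hib := (PySem.List.mem_pyRange_one).mp hi
    congr 1
    rw [List.count_eq_countP, List.count_eq_countP, List.countP_map, List.countP_map]
    apply List.countP_congr
    intro j hj
    have hjb := (PySem.List.mem_pyRange_one).mp hj
    simp only [Function.comp_apply, beq_iff_eq]
    exact hcorr j i hjb.1 (by omega) hib.1 (by omega)
  have hsame : (labf.map (fun x => (PySem.List.count labf x : Int))).sum
      = (ys.map (fun x => (List.count x ys : Int))).sum := by
    simp only [PySem.List.count_eq]
    conv_lhs => rw [hlab]
    rw [hRTys, List.map_map, List.map_map]
    refine congrArg List.sum (List.map_congr_left ?_)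
    intro i hi
    exact (hcnt i hi).symm
  have h2 : 2 * aggE cs = n * n - (labf.map (fun x => (PySem.List.count labf x : Int))).sum := by
    rw [aggE_eq, hS, hQ, hlys, hsame]
  rw [← h2, PySem.Int.floordiv_eq_ediv_of_pos (show (0:Int) < 2 by norm_num),
      Int.mul_ediv_cancel_left _ (show (2:Int) ≠ 0 by norm_num)]

-- ===== VERDICT (by name: the statement is the Claim_ definition above) =====
theorem journeyToMoon_spec : Claim_equal_journeyToMoon := by
  intro n ast hDom hPre
  obtain ⟨hn, hedges⟩ := hPre
  have hNn : ((n.toNat : Nat) : Int) = n := Int.toNat_of_nonneg hn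
  unfold Spec_journeyToMoon journeyToMoon journeyToMoon_alt
  obtain ⟨hInv0, hlen0, hcorr0⟩ := init_state hn
  obtain ⟨_, hlenF, hcorrF⟩ := fold_couple ast (PySem.List.pyRange 0 n 1)
    (List.replicate n.toNat 1) (PySem.List.pyRange 0 n 1) hInv0 hlen0 hcorr0
    (by
      intro v hv
      obtain ⟨h1, h2, h3, h4, h5⟩ := hedges v hv
      refine ⟨h1, by omega, by omega, by omega, by omega⟩)
  exact final_glue _ _ n hNn hlenF hcorrF
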